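-- pv_equiv track=rewrite | github.com/haisum/datascience | assignment3/multiply.py | get_cell
-- ===== SOURCE A (Python) =====
-- def get_cell(list,i,j,second = False):
--   value = 0
--   hit_once = False
--   for item in list:
--     key = str(i) + "," +str(j)
--     if key in item:
--       if not second:
--         value = item[key]
--         break
--       elif hit_once == 1:
--         value = item[key]
--         break
--       else:
--         hit_once = 1
--   return value
-- ===== SOURCE B (Python) =====
-- def get_cell(list, i, j, second=False):
--     # Build a key -> [values in item order] index once, then answer with one lookup.
--     groups = {}
--     for item in list:
--         for k, v in item.items():
--             groups.setdefault(k, []).append(v)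
--     vals = groups.get(str(i) + "," + str(j), [])
--     idx = 1 if second else 0
--     return vals[idx] if len(vals) > idx else 0
-- ===== Notes on version B (the rewrite author's own statement) =====
-- stated objective: alternative
-- what changed: Replaces A's scan-with-flag-and-break over the dicts (per-item key membership test) by building a key->values index of all entries in one pass and answering with a single dict lookup plus an index pick (0 or 1, default 0).
import Mathlib
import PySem

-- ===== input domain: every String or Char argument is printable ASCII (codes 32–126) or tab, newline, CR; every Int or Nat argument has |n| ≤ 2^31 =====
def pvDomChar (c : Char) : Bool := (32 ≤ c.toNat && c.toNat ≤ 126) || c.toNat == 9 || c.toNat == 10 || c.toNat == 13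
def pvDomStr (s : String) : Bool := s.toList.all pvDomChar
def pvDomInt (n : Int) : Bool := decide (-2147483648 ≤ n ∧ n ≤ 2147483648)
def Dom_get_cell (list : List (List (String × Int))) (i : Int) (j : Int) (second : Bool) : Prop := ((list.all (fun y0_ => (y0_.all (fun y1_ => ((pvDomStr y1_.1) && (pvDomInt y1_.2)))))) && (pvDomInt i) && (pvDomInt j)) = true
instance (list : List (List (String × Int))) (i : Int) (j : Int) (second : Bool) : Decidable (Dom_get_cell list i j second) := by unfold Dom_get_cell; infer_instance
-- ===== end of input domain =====

-- B builds a key->values index of all entries in one pass and answers with a single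
-- dict lookup plus an index pick (0 or 1, default 0), instead of A's scan with a
-- hit_once flag, break and per-item membership test; objective: alternative.

-- ===== PORT A =====
-- `key in item` / `item[key]` on a Python dict: membership among keys, first-match lookup
-- (exact for the association-list representation of a dict, whose keys are unique anyway).
def pyLookup (item : List (String × Int)) (key : String) : Option Int :=
  (item.find? (fun p => p.1 == key)).map (·.2)

-- A's for-loop with `value`, `hit_once` and `break`, as structural recursion.
def get_cell_go (key : String) (second : Bool) (hit_once : Bool) :
    List (List (String × Int)) → Int
  | [] => 0
  | item :: rest =>
    match pyLookup item key with
    | some v =>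
      if !second then v
      else if hit_once then v
      else get_cell_go key second true rest
    | none => get_cell_go key second hit_once rest

def get_cell (list : List (List (String × Int))) (i : Int) (j : Int) (second : Bool) : Int :=
  get_cell_go (PySem.Int.toStr i ++ "," ++ PySem.Int.toStr j) second false list

-- ===== PORT B =====
-- item.items(): a Python dict has unique keys; under the assoc-list representation
-- (lookup = first match) its items are the pairs at the FIRST occurrence of each key.
def dictItems (seen : List String) : List (String × Int) → List (String × Int)
  | [] => []
  | (k, v) :: rest =>
    if k ∈ seen then dictItems seen rest
    else (k, v) :: dictItems (k :: seen) rest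

def get_cell_alt (list : List (List (String × Int))) (i : Int) (j : Int) (second : Bool) : Int :=
  -- groups.setdefault(k, []).append(v)  ==  groups[k] = groups.get(k, []) + [v]
  let groups : PySem.Dict String (List Int) :=
    list.foldl
      (fun d item => (dictItems [] item).foldl (fun d p => d.modify p.1 [] (· ++ [p.2])) d)
      PySem.Dict.empty
  let vals := groups.getD (PySem.Int.toStr i ++ "," ++ PySem.Int.toStr j) []
  let idx : Nat := if second then 1 else 0
  if vals.length > idx then vals.getD idx 0 else 0

-- ===== PRECONDITION & SPEC =====
def Spec_get_cell (list : List (List (String × Int))) (i : Int) (j : Int) (second : Bool) (out : Int) : Prop := out = get_cell_alt list i j second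
instance (list : List (List (String × Int))) (i : Int) (j : Int) (second : Bool) (out : Int) : Decidable (Spec_get_cell list i j second out) := by unfold Spec_get_cell; infer_instance

-- ===== CLAIM =====
def Claim_equal_get_cell : Prop := ∀ (list : List (List (String × Int))) (i : Int) (j : Int) (second : Bool), Dom_get_cell list i j second → Spec_get_cell list i j second (get_cell list i j second)

-- ===== LEMMAS AND PROOFS =====
-- A's loop returns the 0th (or, with `second`, the 1st) element of the per-item
-- first-match values, defaulting to 0.
theorem get_cell_go_eq (key : String) (second hit_once : Bool)
    (list : List (List (String × Int))) :
    get_cell_go key second hit_once list =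
      (list.filterMap (fun item => pyLookup item key)).getD
        (if second && !hit_once then 1 else 0) 0 := by
  induction list generalizing hit_once with
  | nil => cases second <;> cases hit_once <;> simp [get_cell_go]
  | cons item rest ih =>
    cases h : pyLookup item key with
    | none => simp [get_cell_go, h, ih]
    | some v =>
      cases second <;> cases hit_once <;>
        simp [get_cell_go, h, ih, List.getD]

-- dictItems keeps at most one pair per key: filtering it at `key` yields exactly
-- the first match of the original assoc list (none if `key` was already seen).
theorem dictItems_filter_key (key : String) (item : List (String × Int)) :
    ∀ seen : List String,
      (dictItems seen item).filter (fun p => p.1 == key) =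
        if key ∈ seen then []
        else ((item.find? (fun p => p.1 == key)).map (fun p => (key, p.2))).toList := by
  induction item with
  | nil => intro seen; simp [dictItems]
  | cons p rest ih =>
    intro seen
    obtain ⟨k, v⟩ := p
    by_cases hk : k = key
    · subst hk
      by_cases hs : k ∈ seen <;>
        simp [dictItems, hs, ih, List.find?]
    · have hne : (k == key) = false := by simp [hk]
      by_cases hs : k ∈ seen <;>
        simp [dictItems, hs, ih, List.find?, hne, Ne.symm hk]

-- The index built by B holds, at `key`, exactly the per-item first-match values in order.
theorem groups_getD (key : String) (list : List (List (String × Int))) :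
    ∀ d : PySem.Dict String (List Int),
      (list.foldl
        (fun d item => (dictItems [] item).foldl (fun d p => d.modify p.1 [] (· ++ [p.2])) d)
        d).getD key [] =
      d.getD key [] ++ list.filterMap (fun item => pyLookup item key) := by
  induction list with
  | nil => intro d; simp
  | cons item rest ih =>
    intro d
    rw [List.foldl_cons, ih, PySem.Dict.getD_foldl_modify_append,
      dictItems_filter_key]
    cases h : item.find? (fun p => p.1 == key) <;>
      simp [pyLookup, h, List.append_assoc]

theorem get_cell_spec : Claim_equal_get_cell := by
  intro list i j second _
  unfold Spec_get_cell get_cell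
  simp only [get_cell_alt]
  rw [get_cell_go_eq, groups_getD]
  simp only [PySem.Dict.getD_empty, List.nil_append]
  set ms := list.filterMap (fun item => pyLookup item (PySem.Int.toStr i ++ "," ++ PySem.Int.toStr j)) with hms
  have key : ∀ n : Nat, ms.getD n 0 = if ms.length > n then ms.getD n 0 else 0 := by
    intro n
    rcases Nat.lt_or_ge n ms.length with h | h
    · simp [h]
    · rw [List.getD_eq_default _ _ h, if_neg (by omega)]
  cases second <;> simp only [Bool.not_false, Bool.and_true, if_true, Bool.false_eq_true] <;>
    exact key _

-- ===== VERDICT =====
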